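-- pv_equiv track=rewrite | github.com/bigmoosage/tMayaUIs_bin | manip/dt_namingConvention.py | pathCorrect
-- ===== SOURCE A (Python) =====
-- def pathCorrect(string):
--     path = string.split('|')
--
--     path[0] = u'MayaWindow'
--
--     correctedPath = ''
--
--     for path in path:
--         correctedPath = correctedPath + '|' + path
--
--     correctedPath = correctedPath[1:]
--
--     return correctedPath
-- ===== SOURCE B (Python) =====
-- def pathCorrect(string):
--     idx = string.find('|')
--     if idx == -1:
--         return 'MayaWindow'
--     return 'MayaWindow' + string[idx:]
-- ===== Notes on version B (the rewrite author's own statement) =====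
-- stated objective: simpler
-- what changed: Replaces the split-into-list / rebuild-by-loop / drop-first-char approach with a single find of the separator and one slice: everything from the first separator onward is kept verbatim after the fixed prefix.
import Mathlib
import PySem

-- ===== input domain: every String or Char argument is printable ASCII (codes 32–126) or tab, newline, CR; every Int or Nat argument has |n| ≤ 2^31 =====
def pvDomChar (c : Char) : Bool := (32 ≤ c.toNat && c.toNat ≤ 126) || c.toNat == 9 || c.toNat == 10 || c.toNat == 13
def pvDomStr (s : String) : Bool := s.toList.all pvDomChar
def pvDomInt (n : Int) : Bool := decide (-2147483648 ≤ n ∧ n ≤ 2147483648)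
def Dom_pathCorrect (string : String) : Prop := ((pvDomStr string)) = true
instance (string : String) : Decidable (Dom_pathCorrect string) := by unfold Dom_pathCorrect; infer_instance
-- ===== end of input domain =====

-- B replaces A's split / rebuild-by-loop / drop-first-char with one find('|') plus a slice (simpler,
-- no intermediate list); string concatenation is ported on the code-point lists (exact for all strings).

-- ===== PORT A =====
def pathCorrect (string : String) : String :=
  -- path = string.split('|')
  let path : List (List Char) := PySem.Chars.splitOn string.toList ['|']
  -- path[0] = u'MayaWindow'   (split never returns an empty list, so this never raises)
  let path := path.set 0 "MayaWindow".toList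
  -- correctedPath = ''; for path in path: correctedPath = correctedPath + '|' + path
  let correctedPath := path.foldl (fun acc p => acc ++ ['|'] ++ p) ([] : List Char)
  -- correctedPath = correctedPath[1:]
  String.ofList (PySem.Chars.slice correctedPath (some 1) none)

-- ===== PORT B =====
def pathCorrect_alt (string : String) : String :=
  -- idx = string.find('|')
  let idx := PySem.Str.find string "|"
  if idx = -1 then "MayaWindow"
  -- return 'MayaWindow' + string[idx:]
  else String.ofList ("MayaWindow".toList ++ PySem.Chars.slice string.toList (some idx) none)

-- ===== PRECONDITION & SPEC =====
def Spec_pathCorrect (string : String) (out : String) : Prop := out = pathCorrect_alt string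
instance (string : String) (out : String) : Decidable (Spec_pathCorrect string out) := by unfold Spec_pathCorrect; infer_instance

-- ===== CLAIM (what is proved, stated in full; the proofs are below) =====
def Claim_equal_pathCorrect : Prop := ∀ (string : String), Dom_pathCorrect string → Spec_pathCorrect string (pathCorrect string)

-- ===== LEMMAS AND PROOFS =====

-- PySem's split on a one-character separator is core's List.splitOn.
lemma splitOn_go_eq (c : Char) : ∀ (fuel : Nat) (l cur : List Char) (acc : List (List Char)), l.length < fuel →
    PySem.Chars.splitOn.go [c] fuel l cur acc
      = acc.reverse ++ (List.splitOn c l).modifyHead (cur.reverse ++ ·) := by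
  intro fuel
  induction fuel with
  | zero => intro l cur acc h; omega
  | succ n ih =>
    intro l cur acc h
    cases l with
    | nil => rw [PySem.Chars.splitOn.go.eq_def]; simp [List.splitOn_nil]
    | cons a rest =>
      by_cases hac : a = c
      · subst hac
        rw [PySem.Chars.splitOn.go.eq_def]
        have hpre : [a].isPrefixOf (a :: rest) = true := by simp [List.isPrefixOf]
        simp only [hpre, if_pos, List.length_singleton, List.drop_succ_cons, List.drop_zero]
        rw [ih rest [] (cur.reverse :: acc) (by simpa using Nat.lt_of_succ_lt_succ h)]
        simp only [List.splitOn, List.splitOnP_cons, beq_self_eq_true, if_pos, List.reverse_nil,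
          List.nil_append, List.reverse_cons, List.append_assoc, List.singleton_append,
          List.modifyHead_cons]
        rw [List.append_nil, show (fun (x : List Char) => x) = id from rfl, List.modifyHead_id, id]
      · rw [PySem.Chars.splitOn.go.eq_def]
        have hpre : [c].isPrefixOf (a :: rest) = false := by
          simp [List.isPrefixOf]; exact fun hh => (hac hh.symm).elim
        simp only [hpre, Bool.false_eq_true, if_false]
        rw [ih rest (a :: cur) acc (by simpa using Nat.lt_of_succ_lt_succ h)]
        have hne := List.splitOnP_ne_nil (fun x => x == c) rest
        simp only [List.splitOn, List.splitOnP_cons] at *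
        rw [if_neg (by simp [hac]), List.modifyHead_modifyHead]
        cases hsp : List.splitOnP (fun x => x == c) rest with
        | nil => exact absurd hsp hne
        | cons x t => simp

lemma splitOn_eq (c : Char) (cs : List Char) :
    PySem.Chars.splitOn cs [c] = List.splitOn c cs := by
  rw [PySem.Chars.splitOn, splitOn_go_eq c (cs.length + 1) cs [] [] (by omega)]
  cases h : List.splitOn c cs with
  | nil => exact absurd h (List.splitOnP_ne_nil _ _)
  | cons x t => simp

lemma splitOn_of_not_mem (c : Char) (cs : List Char) (h : c ∉ cs) :
    List.splitOn c cs = [cs] := by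
  induction cs with
  | nil => simp
  | cons a rest ih =>
    have hac : ¬ (a == c) := by simp; rintro rfl; exact h (List.mem_cons_self)
    have := ih (fun hm => h (List.mem_cons_of_mem _ hm))
    simp only [List.splitOn, List.splitOnP_cons] at *
    rw [if_neg (by simpa using hac)]
    rw [this]
    rfl

lemma splitOn_append_cons (c : Char) (p t : List Char) (h : c ∉ p) :
    List.splitOn c (p ++ c :: t) = p :: List.splitOn c t := by
  induction p with
  | nil =>
    simp only [List.nil_append, List.splitOn, List.splitOnP_cons]
    rw [if_pos (by simp)]
  | cons a rest ih =>
    have hac : a ≠ c := by rintro rfl; exact h List.mem_cons_self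
    have := ih (fun hm => h (List.mem_cons_of_mem _ hm))
    simp only [List.cons_append, List.splitOn, List.splitOnP_cons] at *
    rw [if_neg (by simpa using hac), this]
    rfl

lemma flatMap_cons_sep (c : Char) (l : List (List Char)) (h : l ≠ []) :
    List.flatMap (fun p => c :: p) l = c :: [c].intercalate l := by
  induction l with
  | nil => exact absurd rfl h
  | cons x t ih =>
    cases t with
    | nil => simp [List.intercalate]
    | cons y u =>
      rw [List.flatMap_cons, ih (by simp)]
      simp [List.intercalate, List.intersperse]

-- ===== VERDICT (by name: the statement is the Claim_ definition above) =====
-- A's value in closed form: "MayaWindow" followed by the '|'-joined tail of the split.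
lemma pathCorrect_closed (s : String) :
    pathCorrect s = String.ofList ("MayaWindow".toList
      ++ (List.splitOn '|' s.toList).tail.flatMap (fun p => '|' :: p)) := by
  unfold pathCorrect
  rw [splitOn_eq]
  cases hsp : List.splitOn '|' s.toList with
  | nil => exact absurd hsp (List.splitOnP_ne_nil _ _)
  | cons h t =>
    simp only [List.set_cons_zero, List.tail_cons]
    have hfold : ∀ (l : List (List Char)) (acc : List Char),
        l.foldl (fun acc p => acc ++ ['|'] ++ p) acc = acc ++ l.flatMap (fun p => '|' :: p) := by
      intro l
      induction l with
      | nil => intro acc; simp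
      | cons x xs ih => intro acc; rw [List.foldl_cons, ih]; simp
    rw [hfold]
    congr 1
    rw [PySem.Chars.slice_eq_listSlice, PySem.List.slice_from _ (by norm_num : (0:Int) ≤ 1)]
    simp

theorem pathCorrect_spec : Claim_equal_pathCorrect := by
  intro s _
  unfold Spec_pathCorrect pathCorrect_alt
  rw [pathCorrect_closed]
  set cs := s.toList with hcs
  rw [PySem.Str.find_eq]
  by_cases hmem : '|' ∈ cs
  · -- a separator occurs: both sides are "MayaWindow" ++ cs[find:]
    set i := PySem.Chars.find cs ("|".toList) with hi
    have h01 : ("|" : String).toList = ['|'] := rfl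
    have hpos : 0 ≤ i := by
      rw [hi, h01, PySem.Chars.find_nonneg_iff]
      exact (List.singleton_infix_iff '|' cs).mpr hmem
    rw [if_neg (by omega)]
    obtain ⟨hpre, hmin⟩ := PySem.Chars.find_spec (s := cs) (sub := "|".toList) (hi ▸ hpos)
    simp only [h01] at hi hpre hmin
    rw [← hi] at hpre hmin
    obtain ⟨t', hdrop⟩ := hpre
    simp only [List.singleton_append] at hdrop
    have hlen : i.toNat ≤ cs.length := by
      have := PySem.Chars.find_le_length cs ("|".toList)
      omega
    have hsplit : cs = cs.take i.toNat ++ '|' :: t' := by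
      conv_lhs => rw [← List.take_append_drop i.toNat cs, hdrop.symm]
    have hnot : '|' ∉ cs.take i.toNat := by
      intro hmemtake
      obtain ⟨j, hj, hget⟩ := List.mem_iff_getElem.mp hmemtake
      have hjlt : j < i.toNat := by
        have := List.length_take_le i.toNat cs; omega
      apply hmin j hjlt
      refine ⟨(cs.drop j).tail, ?_⟩
      have hjcs : j < cs.length := by omega
      have : cs.drop j = '|' :: (cs.drop j).tail := by
        have hh : (cs.drop j).head? = some '|' := by
          rw [List.head?_drop]
          simp only [List.getElem?_eq_getElem hjcs]
          rw [← hget]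
          congr 1
          exact (List.getElem_take).symm
        cases hd : cs.drop j with
        | nil => rw [hd] at hh; simp at hh
        | cons x xs => rw [hd] at hh; simp at hh; simp [hh]
      simpa using this.symm
    rw [show List.splitOn '|' cs = cs.take i.toNat :: List.splitOn '|' t' by
      conv_lhs => rw [hsplit]
      exact splitOn_append_cons '|' _ t' hnot]
    simp only [List.tail_cons]
    rw [flatMap_cons_sep '|' (List.splitOn '|' t')
          (by unfold List.splitOn; exact List.splitOnP_ne_nil _ _),
        List.intercalate_splitOn t' '|']
    congr 1
    rw [PySem.Chars.slice_eq_listSlice, PySem.List.slice_from _ hpos, ← hdrop]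
  · -- no separator: A rebuilds just "MayaWindow", B returns it directly
    have hneg : PySem.Chars.find cs ("|".toList) = -1 := by
      rw [PySem.Chars.find_eq_neg_one_iff]
      exact fun hinf => hmem ((List.singleton_infix_iff '|' cs).mp hinf)
    rw [if_pos hneg]
    rw [splitOn_of_not_mem '|' cs hmem]
    rfl
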